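-- pv_equiv track=rewrite | github.com/Coslate/NBA_Game_Winning_Forecasting | text_mining/code/Word2Vec_Dev/word2vec_wordcloud.py | GenDictWithMaxValue
-- ===== SOURCE A (Python) =====
-- def GenDictWithMaxValue(list_of_tuples):
--     ans_dict = {}
--     for k, v in list_of_tuples:
--         if(k in ans_dict):
--             if(v > ans_dict[k]):
--                 ans_dict[k] = v
--         else:
--             ans_dict[k] = v
--     return ans_dict
-- ===== SOURCE B (Python) =====
-- def GenDictWithMaxValue(list_of_tuples):
--     groups = {}
--     for k, v in list_of_tuples:
--         groups.setdefault(k, []).append(v)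
--     return {k: max(vs) for k, vs in groups.items()}
-- ===== Notes on version B (the rewrite author's own statement) =====
-- stated objective: alternative
-- what changed: B first groups all values per key into buckets with setdefault, then reduces each bucket with max in a second pass, instead of threading a running maximum through the dict in one loop.
import Mathlib
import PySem

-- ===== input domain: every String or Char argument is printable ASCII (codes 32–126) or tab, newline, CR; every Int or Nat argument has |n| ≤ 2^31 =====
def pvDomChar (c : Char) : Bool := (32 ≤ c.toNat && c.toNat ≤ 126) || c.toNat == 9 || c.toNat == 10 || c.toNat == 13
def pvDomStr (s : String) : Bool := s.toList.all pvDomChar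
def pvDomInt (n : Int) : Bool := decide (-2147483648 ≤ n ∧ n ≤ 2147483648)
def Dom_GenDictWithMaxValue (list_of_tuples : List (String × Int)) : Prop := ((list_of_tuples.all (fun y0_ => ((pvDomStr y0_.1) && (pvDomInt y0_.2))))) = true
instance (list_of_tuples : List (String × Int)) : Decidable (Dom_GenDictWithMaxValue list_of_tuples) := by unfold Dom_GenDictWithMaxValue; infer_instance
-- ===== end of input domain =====

-- B groups all values per key into buckets and reduces each bucket with max in a second
-- pass, instead of A's single loop threading a running maximum (objective: alternative).

-- ===== PORT A =====
def GenDictWithMaxValue (list_of_tuples : List (String × Int)) : List (String × Int) :=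
  (list_of_tuples.foldl (fun d p =>
      if d.contains p.1 then
        (if p.2 > d.getD p.1 0 then d.insert p.1 p.2 else d)
      else d.insert p.1 p.2)
    PySem.Dict.empty).items

-- ===== PORT B =====
def GenDictWithMaxValue_alt (list_of_tuples : List (String × Int)) : List (String × Int) :=
  let groups := list_of_tuples.foldl
      (fun d p => d.modify p.1 [] (fun vs => vs ++ [p.2])) PySem.Dict.empty
  groups.items.map (fun p => (p.1, (PySem.List.max? p.2 (fun y => y)).getD 0))

-- ===== PRECONDITION & SPEC =====
def Spec_GenDictWithMaxValue (list_of_tuples : List (String × Int)) (out : List (String × Int)) : Prop := out = GenDictWithMaxValue_alt list_of_tuples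
instance (list_of_tuples : List (String × Int)) (out : List (String × Int)) : Decidable (Spec_GenDictWithMaxValue list_of_tuples out) := by unfold Spec_GenDictWithMaxValue; infer_instance

-- ===== CLAIM (what is proved, stated in full; the proofs are below) =====
def Claim_equal_GenDictWithMaxValue : Prop := ∀ (list_of_tuples : List (String × Int)), Dom_GenDictWithMaxValue list_of_tuples → Spec_GenDictWithMaxValue list_of_tuples (GenDictWithMaxValue list_of_tuples)

-- ===== LEMMAS AND PROOFS =====

-- A's loop step, named for the proofs
def pvStepA (d : PySem.Dict String Int) (p : String × Int) : PySem.Dict String Int :=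
  if d.contains p.1 then
    (if p.2 > d.getD p.1 0 then d.insert p.1 p.2 else d)
  else d.insert p.1 p.2

-- the running strict-'>' maximum A threads, seeded with an optional current value
def pvRunMax (o : Option Int) (vs : List Int) : Option Int :=
  vs.foldl (fun acc v => match acc with
    | none => some v
    | some w => if v > w then some v else acc) o

lemma pvRunMax_some (w : Int) (vs : List Int) : pvRunMax (some w) vs = some (vs.foldl max w) := by
  induction vs generalizing w with
  | nil => rfl
  | cons v vs ih =>
      simp only [pvRunMax, List.foldl] at *
      by_cases h : v > w
      · simp [h, max_eq_right (le_of_lt h), ih]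
      · simp [h, max_eq_left (le_of_not_gt h), ih]

lemma pvKeysA (xs : List (String × Int)) (d : PySem.Dict String Int) :
    (xs.foldl pvStepA d).keys = PySem.Set.update d.keys (xs.map (·.1)) := by
  induction xs generalizing d with
  | nil => rfl
  | cons p xs ih =>
      simp only [List.foldl, List.map, PySem.Set.update_cons]
      rw [ih]
      congr 1
      by_cases h : d.contains p.1
      · have hm : p.1 ∈ d.keys := (PySem.Dict.contains_iff_mem_keys d p.1).1 h
        simp only [pvStepA, h, if_true, PySem.Set.add_of_mem hm]
        split
        · exact PySem.Dict.keys_insert_of_contains d _ h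
        · rfl
      · have hm : p.1 ∉ d.keys := fun hmem => h ((PySem.Dict.contains_iff_mem_keys d p.1).2 hmem)
        simp only [pvStepA, h, PySem.Set.add_of_not_mem hm]
        exact PySem.Dict.keys_insert_of_not_contains d _ (by revert h; cases d.contains p.1 <;> simp)

lemma pvNodupA (xs : List (String × Int)) (d : PySem.Dict String Int) (h : d.keys.Nodup) :
    (xs.foldl pvStepA d).keys.Nodup := by
  induction xs generalizing d with
  | nil => exact h
  | cons p xs ih =>
      refine ih _ ?_
      unfold pvStepA
      split
      · split
        · exact PySem.Dict.nodup_keys_insert _ _ _ h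
        · exact h
      · exact PySem.Dict.nodup_keys_insert _ _ _ h

lemma pvGetA (xs : List (String × Int)) (d : PySem.Dict String Int) (c : String) :
    (xs.foldl pvStepA d).get? c
      = pvRunMax (d.get? c) ((xs.filter (fun p => p.1 == c)).map (·.2)) := by
  induction xs generalizing d with
  | nil => rfl
  | cons p xs ih =>
      simp only [List.foldl, List.filter]
      by_cases hc : p.1 = c
      · subst hc
        simp only [beq_self_eq_true, List.map]
        rw [ih]
        have hstep : (pvStepA d p).get? p.1
            = (match d.get? p.1 with
               | none => some p.2
               | some w => if p.2 > w then some p.2 else some w) := by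
          unfold pvStepA
          rw [PySem.Dict.contains_eq_isSome_get?]
          cases hg : d.get? p.1 with
          | none => simp [PySem.Dict.get?_insert_self]
          | some w =>
              simp only [Option.isSome_some, if_true,
                PySem.Dict.getD_eq_get?_getD, hg, Option.getD_some]
              split
              · simp [PySem.Dict.get?_insert_self]
              · simp [hg]
        rw [hstep]
        cases hg : d.get? p.1 with
        | none => rfl
        | some w =>
            simp only [pvRunMax, List.foldl]
      · have hb : (p.1 == c) = false := beq_false_of_ne hc
        simp only [hb]
        rw [ih]
        have : (pvStepA d p).get? c = d.get? c := by
          unfold pvStepA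
          have hne : c ≠ p.1 := fun h => hc h.symm
          split
          · split
            · exact PySem.Dict.get?_insert_of_ne d _ hne
            · rfl
          · exact PySem.Dict.get?_insert_of_ne d _ hne
        rw [this]

-- ===== VERDICT (by name: the statement is the Claim_ definition above) =====
theorem GenDictWithMaxValue_spec : Claim_equal_GenDictWithMaxValue := by
  intro xs _
  show GenDictWithMaxValue xs = GenDictWithMaxValue_alt xs
  have hBdef : GenDictWithMaxValue_alt xs
      = (xs.foldl (fun d p => d.modify p.1 [] (fun vs => vs ++ [p.2]))
          PySem.Dict.empty).items.map
          (fun p => (p.1, (PySem.List.max? p.2 (fun y => y)).getD 0)) := rfl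
  rw [hBdef]
  unfold GenDictWithMaxValue
  have hstep : (fun d (p : String × Int) =>
      if d.contains p.1 then
        (if p.2 > d.getD p.1 0 then d.insert p.1 p.2 else d)
      else d.insert p.1 p.2) = pvStepA := rfl
  rw [hstep]
  set dA := xs.foldl pvStepA PySem.Dict.empty with hdA
  set dG := xs.foldl (fun d p => d.modify p.1 [] (fun vs => vs ++ [p.2])) PySem.Dict.empty with hdG
  have hkA : dA.keys = PySem.Set.ofList (xs.map (·.1)) := by
    rw [hdA, pvKeysA]
    simp [PySem.Dict.keys_empty, PySem.Set.update_nil_left]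
  have hkG : dG.keys = PySem.Set.ofList (xs.map (·.1)) := by
    rw [hdG, PySem.Dict.keys_foldl_modify_key]
    simp [PySem.Dict.keys_empty, PySem.Set.update_nil_left]
  have hndA : dA.keys.Nodup := pvNodupA xs _ (by simp [PySem.Dict.keys_empty])
  have hndG : dG.keys.Nodup := by rw [hkG]; exact PySem.Set.nodup_ofList _
  rw [PySem.Dict.items_eq_map_keys dA hndA 0,
      PySem.Dict.items_eq_map_keys dG hndG []]
  rw [List.map_map, hkA, hkG]
  apply List.map_congr_left
  intro k hk
  have hbucket : dG.getD k [] = (xs.filter (fun p => p.1 == k)).map (·.2) := by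
    rw [hdG, PySem.Dict.getD_foldl_modify_append]
    simp [PySem.Dict.getD_empty]
  have hget : dA.get? k = pvRunMax none ((xs.filter (fun p => p.1 == k)).map (·.2)) := by
    rw [hdA, pvGetA]; simp [PySem.Dict.get?_empty]
  have hkmem : k ∈ xs.map (·.1) := (PySem.Set.mem_ofList _ _).1 hk
  obtain ⟨p, hpmem, hpk⟩ := List.mem_map.1 hkmem
  have hfilter : ((xs.filter (fun p => p.1 == k)).map (·.2)) ≠ [] := by
    have : p ∈ xs.filter (fun p => p.1 == k) :=
      List.mem_filter.2 ⟨hpmem, by simp [hpk]⟩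
    intro hnil
    simp only [List.map_eq_nil_iff] at hnil
    rw [hnil] at this; exact (List.not_mem_nil) this
  cases hvs : ((xs.filter (fun p => p.1 == k)).map (·.2)) with
  | nil => exact absurd hvs hfilter
  | cons v vs =>
      simp only [Function.comp]
      rw [hbucket, hvs]
      have h1 : pvRunMax none (v :: vs) = pvRunMax (some v) vs := rfl
      rw [PySem.Dict.getD_eq_get?_getD, hget, hvs, h1, pvRunMax_some,
          PySem.List.max?_id_cons]
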